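-- pv_equiv track=rewrite | github.com/brendanwhit/pocs-final-project | extractstory.py | fill_missing_dates
-- ===== SOURCE A (Python) =====
-- def remove_duplicates(rank_list):
--     """ Remove values from duplicate days, using the smaller rank value from
--     duplicates
--     """
--     dates_seen = []
--     ranks_seen = []
--     for date, rank in rank_list:
--         if date in dates_seen:
--             ix = dates_seen.index(date)
--             if rank < ranks_seen[ix]:
--                 ranks_seen[ix] = rank
--         else:
--             dates_seen.append(date)
--             ranks_seen.append(rank)
--     return list(zip(dates_seen, ranks_seen))
--
-- def fill_missing_dates(rank_list, shock_dates, cutoff=100001):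
--     """ Fill missing dates if the list of ranks is missing them, and set them
--     as the lowest possible value.
--     """
--     for key, values in rank_list.items():
--         if len(values) < len(shock_dates):
--             dates, ranks = zip(*values)
--             for date in shock_dates:
--                 if date not in dates:
--                     values.append((date, cutoff))
--         values = sorted(values)
--         if len(values) > len(shock_dates):
--             values = remove_duplicates(values)
--
--         rank_list[key] = values
--
--     return rank_list
-- ===== SOURCE B (Python) =====
-- def fill_missing_dates(rank_list, shock_dates, cutoff=100001):
--     """ Same per-key pipeline: fill missing shock dates at the cutoff rank,
--     sort, then (under the same length guard) deduplicate.  The fill step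
--     tests membership against a set of the present dates, and deduplication
--     is one adjacent-pair pass over the sorted list (the first pair of each
--     date group carries the minimal rank).  Builds new value lists instead
--     of appending in place; the returned dict holds the same values.
--     """
--     for key, values in rank_list.items():
--         if len(values) < len(shock_dates):
--             present = {d for d, _ in values}
--             values = values + [(d, cutoff) for d in shock_dates if d not in present]
--         values = sorted(values)
--         if len(values) > len(shock_dates):
--             values = _dedup_sorted(values)
--         rank_list[key] = values
--     return rank_list
--
--
-- def _dedup_sorted(values):
--     """ values is sorted; keep the first pair of each run of equal dates. """
--     out = []
--     prev = None
--     for date, rank in values: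
--         if prev is None or date != prev:
--             out.append((date, rank))
--             prev = date
--     return out
-- ===== Notes on version B (the rewrite author's own statement) =====
-- stated objective: alternative
-- what changed: The duplicate-removal with parallel dates_seen/ranks_seen lists and repeated `in`/.index scans is replaced by a single adjacent-pair pass over the already-sorted values (the first pair of each equal-date run carries the minimal rank), and the fill step tests membership against a prebuilt set of the present dates instead of rescanning the zipped tuple; the per-key pipeline and its guards are unchanged.
-- outside the precondition, e.g. on fill_missing_dates({'a': []}, ['d1'], 5): A raises ValueError, B returns {'a': [('d1', 5)]}
import Mathlib
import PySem

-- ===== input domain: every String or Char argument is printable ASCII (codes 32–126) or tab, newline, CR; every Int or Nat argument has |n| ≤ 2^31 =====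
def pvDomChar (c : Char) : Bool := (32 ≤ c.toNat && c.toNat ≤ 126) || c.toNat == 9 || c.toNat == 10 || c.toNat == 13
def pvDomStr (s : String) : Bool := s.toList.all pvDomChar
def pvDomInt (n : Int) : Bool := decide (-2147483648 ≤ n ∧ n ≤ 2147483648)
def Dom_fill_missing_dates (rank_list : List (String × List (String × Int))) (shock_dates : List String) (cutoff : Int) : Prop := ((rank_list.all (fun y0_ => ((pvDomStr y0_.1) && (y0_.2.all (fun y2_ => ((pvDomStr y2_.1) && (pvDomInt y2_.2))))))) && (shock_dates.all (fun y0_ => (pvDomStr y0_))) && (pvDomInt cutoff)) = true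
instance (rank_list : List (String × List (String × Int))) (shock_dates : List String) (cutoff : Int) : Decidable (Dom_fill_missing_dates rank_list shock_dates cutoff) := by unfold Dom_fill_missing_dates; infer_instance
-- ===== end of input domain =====

-- B replaces the parallel-list dedup (membership and .index scans) by one adjacent-pair pass
-- over the sorted values, and the fill test by a prebuilt set of present dates; equivalence is
-- about the RETURN value only (A mutates the argument dict's value lists in place, B reassigns).

-- ===== PORT A =====
-- remove_duplicates: loop over rank_list keeping parallel lists dates_seen / ranks_seen.
-- `ranks_seen[ix]` / `ranks_seen[ix] = rank` use an index delivered by `.index` on a seen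
-- member, hence always in range: ported as List.getD / List.set (exact there).
def rdLoop : List (String × Int) → List String → List Int → List String × List Int
  | [], ds, rs => (ds, rs)
  | (date, rank) :: rest, ds, rs =>
    if date ∈ ds then
      match PySem.List.index? ds date with
      | some ix =>
          if rank < rs.getD ix 0 then rdLoop rest ds (rs.set ix rank)
          else rdLoop rest ds rs
      | none => rdLoop rest ds rs   -- unreachable: guarded by `date ∈ ds`
    else rdLoop rest (ds ++ [date]) (rs ++ [rank])

def remove_duplicates (rank_list : List (String × Int)) : List (String × Int) :=
  let p := rdLoop rank_list [] []
  p.1.zip p.2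

-- fill_missing_dates: `for key, values in rank_list.items(): … rank_list[key] = values` updates
-- each (distinct) key of the dict in place, i.e. a per-entry transformation in insertion order;
-- `dates, ranks = zip(*values)` is the snapshot of first components (Pre_ excludes the empty
-- `values` on which zip(*[]) raises ValueError).
def fill_missing_dates (rank_list : List (String × List (String × Int))) (shock_dates : List String) (cutoff : Int) : List (String × List (String × Int)) :=
  rank_list.map (fun (kv : String × List (String × Int)) =>
    let values := kv.2
    let values :=
      if values.length < shock_dates.length then
        let dates := values.map (·.1)
        shock_dates.foldl (fun (acc : List (String × Int)) date => if date ∈ dates then acc else acc ++ [(date, cutoff)]) values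
      else values
    let values := PySem.List.sorted2 values (·.1) (·.2) false
    let values := if shock_dates.length < values.length then remove_duplicates values else values
    (kv.1, values))

-- ===== PORT B =====
-- _dedup_sorted: one pass with accumulator `out` and the previous date `prev` (None before the
-- first pair), keeping the first pair of each run of equal dates.
def dedup_sorted (values : List (String × Int)) : List (String × Int) :=
  (values.foldl
    (fun (st : List (String × Int) × Option String) p =>
      match st.2 with
      | none => (st.1 ++ [p], some p.1)
      | some prev => if p.1 ≠ prev then (st.1 ++ [p], some p.1) else st)
    ([], none)).1

def fill_missing_dates_alt (rank_list : List (String × List (String × Int))) (shock_dates : List String) (cutoff : Int) : List (String × List (String × Int)) :=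
  rank_list.map (fun (kv : String × List (String × Int)) =>
    let values := kv.2
    let values :=
      if values.length < shock_dates.length then
        let present := PySem.Set.ofList (values.map (·.1))
        values ++ (shock_dates.filter (fun d => !(PySem.Set.contains present d))).map (fun d => (d, cutoff))
      else values
    let values := PySem.List.sorted2 values (·.1) (·.2) false
    let values := if shock_dates.length < values.length then dedup_sorted values else values
    (kv.1, values))

-- ===== PRECONDITION & SPEC =====
-- Pre_ excludes (i) association lists with duplicate keys — they do not represent any Python
-- dict argument (the dict constructor collapses them) — and (ii) entries with an empty value
-- list while shock_dates is nonempty, on which A's `zip(*values)` raises ValueError.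
def Pre_fill_missing_dates (rank_list : List (String × List (String × Int))) (shock_dates : List String) (cutoff : Int) : Prop :=
  rank_list.Pairwise (fun a b => a.1 ≠ b.1) ∧
  ∀ p ∈ rank_list, p.2 = [] → shock_dates = []
instance (rank_list : List (String × List (String × Int))) (shock_dates : List String) (cutoff : Int) : Decidable (Pre_fill_missing_dates rank_list shock_dates cutoff) := by unfold Pre_fill_missing_dates; infer_instance

def pvWitness_fill_missing_dates : (List (String × List (String × Int))) × List String × Int :=
  ([("a", [("d1", 3), ("d1", 1)]), ("b", [("d2", 7)])], ["d1", "d2"], 100001)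

def Spec_fill_missing_dates (rank_list : List (String × List (String × Int))) (shock_dates : List String) (cutoff : Int) (out : List (String × List (String × Int))) : Prop := out = fill_missing_dates_alt rank_list shock_dates cutoff
instance (rank_list : List (String × List (String × Int))) (shock_dates : List String) (cutoff : Int) (out : List (String × List (String × Int))) : Decidable (Spec_fill_missing_dates rank_list shock_dates cutoff out) := by unfold Spec_fill_missing_dates; infer_instance

-- ===== CLAIM (what is proved, stated in full; the proofs are below) =====
def Claim_equal_fill_missing_dates : Prop := ∀ (rank_list : List (String × List (String × Int))) (shock_dates : List String) (cutoff : Int), Dom_fill_missing_dates rank_list shock_dates cutoff → Pre_fill_missing_dates rank_list shock_dates cutoff → Spec_fill_missing_dates rank_list shock_dates cutoff (fill_missing_dates rank_list shock_dates cutoff)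

-- ===== LEMMAS AND PROOFS =====

-- The (non-strict, total) lexicographic order the sorted values satisfy.
def lexLe (a b : String × Int) : Prop := a.1 ≤ b.1 ∧ (a.1 = b.1 → a.2 ≤ b.2)

lemma lexLe_trans {a b c : String × Int} (h1 : lexLe a b) (h2 : lexLe b c) : lexLe a c := by
  obtain ⟨h11, h12⟩ := h1; obtain ⟨h21, h22⟩ := h2
  refine ⟨le_trans h11 h21, fun h => ?_⟩
  have hb : a.1 = b.1 := le_antisymm h11 (by rw [h]; exact h21)
  have hbc : b.1 = c.1 := by rw [← hb]; exact h
  exact le_trans (h12 hb) (h22 hbc)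

-- sorted2 with the pair projections is the insertion sort with this `before` test (definitional).
def bef (a b : String × Int) : Bool :=
  decide (a.1 < b.1) || (!decide (b.1 < a.1) && decide (a.2 < b.2))

lemma sorted2_eq_foldl (xs : List (String × Int)) :
    PySem.List.sorted2 xs (·.1) (·.2) false =
      xs.foldl (fun acc x => PySem.List.insertBy bef x acc) [] := rfl

lemma lexLe_of_bef {a b : String × Int} (h : bef a b = true) : lexLe a b := by
  simp only [bef, Bool.or_eq_true, Bool.and_eq_true, Bool.not_eq_true', decide_eq_true_eq,
    decide_eq_false_iff_not] at h
  rcases h with h | ⟨h1, h2⟩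
  · exact ⟨le_of_lt h, fun he => absurd (he ▸ h) (lt_irrefl _)⟩
  · exact ⟨le_of_not_gt h1, fun _ => le_of_lt h2⟩

lemma lexLe_of_not_bef {a b : String × Int} (h : ¬ bef a b = true) : lexLe b a := by
  simp only [bef, Bool.or_eq_true, Bool.and_eq_true, Bool.not_eq_true', decide_eq_true_eq,
    decide_eq_false_iff_not, not_or, not_and] at h
  obtain ⟨h1, h2⟩ := h
  refine ⟨le_of_not_gt h1, fun he => ?_⟩
  rcases lt_or_ge b.1 a.1 with hlt | _
  · exact absurd he (ne_of_lt hlt)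
  · have := h2 (by simp [he]) ; exact le_of_not_gt this

lemma insertBy_bef_pairwise (x : String × Int) (ys : List (String × Int))
    (h : ys.Pairwise lexLe) : (PySem.List.insertBy bef x ys).Pairwise lexLe := by
  induction ys with
  | nil => simp [PySem.List.insertBy]
  | cons y ys ih =>
    rw [List.pairwise_cons] at h
    obtain ⟨hy, hys⟩ := h
    by_cases hb : bef x y = true
    · rw [PySem.List.insertBy, if_pos hb]
      have hxy := lexLe_of_bef hb
      refine List.Pairwise.cons (fun z hz => ?_) (List.Pairwise.cons hy hys)
      rw [List.mem_cons] at hz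
      rcases hz with rfl | hz
      · exact hxy
      · exact lexLe_trans hxy (hy z hz)
    · rw [PySem.List.insertBy, if_neg hb]
      refine List.Pairwise.cons (fun z hz => ?_) (ih hys)
      rw [PySem.List.insertBy_mem_iff] at hz
      rcases hz with rfl | hz
      · exact lexLe_of_not_bef hb
      · exact hy z hz

lemma foldl_insertBy_pairwise (xs acc : List (String × Int))
    (h : acc.Pairwise lexLe) :
    (xs.foldl (fun acc x => PySem.List.insertBy bef x acc) acc).Pairwise lexLe := by
  induction xs generalizing acc with
  | nil => exact h
  | cons x xs ih => exact ih _ (insertBy_bef_pairwise x acc h)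

lemma sorted2_pairwise_lexLe (xs : List (String × Int)) :
    (PySem.List.sorted2 xs (·.1) (·.2) false).Pairwise lexLe := by
  rw [sorted2_eq_foldl]
  exact foldl_insertBy_pairwise xs [] List.Pairwise.nil

-- The recursive skeleton both dedups reduce to: keep each pair whose date differs from `prev`.
def dedupGo : String → List (String × Int) → List (String × Int)
  | _, [] => []
  | prev, q :: rest => if q.1 = prev then dedupGo prev rest else q :: dedupGo q.1 rest

lemma dedup_sorted_foldl (w : List (String × Int)) (out : List (String × Int)) (prev : String) :
    (w.foldl
      (fun (st : List (String × Int) × Option String) p =>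
        match st.2 with
        | none => (st.1 ++ [p], some p.1)
        | some prev => if p.1 ≠ prev then (st.1 ++ [p], some p.1) else st)
      (out, some prev)).1 = out ++ dedupGo prev w := by
  induction w generalizing out prev with
  | nil => simp [dedupGo]
  | cons q rest ih =>
    by_cases h : q.1 = prev
    · simp only [List.foldl_cons, dedupGo, ne_eq, h, not_true_eq_false, if_false]
      exact ih out prev
    · simp only [List.foldl_cons, dedupGo, ne_eq, h, not_false_eq_true, if_true]
      rw [ih (out ++ [q]) q.1, List.append_assoc]
      rfl

lemma dedup_sorted_eq_go (w : List (String × Int)) :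
    dedup_sorted w = match w with
      | [] => []
      | p :: rest => p :: dedupGo p.1 rest := by
  cases w with
  | nil => rfl
  | cons p rest =>
    show (rest.foldl _ (([] : List (String × Int)) ++ [p], some p.1)).1 = _
    rw [dedup_sorted_foldl rest ([] ++ [p]) p.1]
    simp

-- Invariant of A's remove_duplicates loop on a lex-sorted list: dates_seen stays strictly
-- increasing with `prev` last (so `.index` always finds the last slot), no rank update ever
-- fires, and the loop appends exactly the adjacent dedup of the remaining pairs.
lemma rdLoop_sorted (w : List (String × Int)) (ds0 : List String) (rs0 : List Int)
    (prev : String) (rlast : Int)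
    (hlen : ds0.length = rs0.length)
    (hds : ∀ x ∈ ds0, x < prev)
    (hw1 : ∀ q ∈ w, prev ≤ q.1)
    (hw2 : ∀ q ∈ w, q.1 = prev → rlast ≤ q.2)
    (hpw : w.Pairwise lexLe) :
    (rdLoop w (ds0 ++ [prev]) (rs0 ++ [rlast])).1.zip
        (rdLoop w (ds0 ++ [prev]) (rs0 ++ [rlast])).2 =
      (ds0 ++ [prev]).zip (rs0 ++ [rlast]) ++ dedupGo prev w := by
  induction w generalizing ds0 rs0 prev rlast with
  | nil => simp [rdLoop, dedupGo]
  | cons q rest ih =>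
    obtain ⟨d, r⟩ := q
    rw [List.pairwise_cons] at hpw
    obtain ⟨hq, hrest⟩ := hpw
    have hdprev : prev ≤ d := hw1 (d, r) (by simp)
    by_cases hdp : d = prev
    · -- duplicate of the previous date: A finds it at the last slot, keeps the smaller rank
      have hmem : d ∈ ds0 ++ [prev] := by simp [hdp]
      have hnotin : prev ∉ ds0 := fun hx => absurd (hds prev hx) (lt_irrefl _)
      have hidx : PySem.List.index? (ds0 ++ [prev]) d = some ds0.length := by
        rw [hdp]; exact PySem.List.index?_append_singleton_self ds0 prev hnotin
      have hget : (rs0 ++ [rlast]).getD ds0.length 0 = rlast := by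
        rw [List.getD_eq_getElem?_getD, hlen, List.getElem?_append_right (le_refl _)]
        simp
      have hnolt : ¬ (r < (rs0 ++ [rlast]).getD ds0.length 0) := by
        rw [hget]; exact not_lt.mpr (hw2 (d, r) (by simp) hdp)
      rw [rdLoop, if_pos hmem, hidx]
      simp only [hnolt, if_false]
      rw [dedupGo, if_pos hdp]
      exact ih ds0 rs0 prev rlast hlen hds
        (fun p hp => hw1 p (List.mem_cons_of_mem _ hp))
        (fun p hp => hw2 p (List.mem_cons_of_mem _ hp)) hrest
    · -- a new, strictly larger date: appended to both seen lists
      have hlt : prev < d := lt_of_le_of_ne hdprev (Ne.symm hdp)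
      have hnmem : d ∉ ds0 ++ [prev] := by
        simp only [List.mem_append, List.mem_singleton, not_or]
        exact ⟨fun hx => absurd (lt_trans (hds d hx) hlt) (lt_irrefl _), hdp⟩
      rw [rdLoop, if_neg hnmem]
      have hzip : (ds0 ++ [prev] ++ [d]).zip (rs0 ++ [rlast] ++ [r]) =
          (ds0 ++ [prev]).zip (rs0 ++ [rlast]) ++ [(d, r)] := by
        apply List.zip_append; simp [hlen]
      rw [ih (ds0 ++ [prev]) (rs0 ++ [rlast]) d r (by simp [hlen])
            (by intro x hx
                rcases List.mem_append.mp hx with hx | hx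
                · exact lt_trans (hds x hx) hlt
                · simp only [List.mem_singleton] at hx; exact hx ▸ hlt)
            (fun p hp => (hq p hp).1)
            (fun p hp hpe => (hq p hp).2 hpe.symm)
            hrest]
      rw [hzip, dedupGo, if_neg hdp, List.append_assoc]
      rfl

-- A's helper equals B's adjacent one-pass dedup on any lex-sorted list.
lemma remove_duplicates_eq_dedup_sorted (w : List (String × Int))
    (hpw : w.Pairwise lexLe) :
    remove_duplicates w = dedup_sorted w := by
  cases w with
  | nil => rfl
  | cons p rest =>
    obtain ⟨d, r⟩ := p
    rw [List.pairwise_cons] at hpw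
    obtain ⟨hq, hrest⟩ := hpw
    show (rdLoop ((d, r) :: rest) [] []).1.zip (rdLoop ((d, r) :: rest) [] []).2 = _
    rw [dedup_sorted_eq_go]
    have : rdLoop ((d, r) :: rest) [] [] = rdLoop rest ([] ++ [d]) ([] ++ [r]) := by
      rw [rdLoop]; simp
    rw [this,
      rdLoop_sorted rest [] [] d r rfl (by simp)
        (fun p hp => (hq p hp).1) (fun p hp hpe => (hq p hp).2 hpe.symm) hrest]
    simp

-- The fill step: A's append-loop over shock_dates equals B's filtered comprehension.
lemma fill_step_eq (shock_dates : List String) (cutoff : Int) (v : List (String × Int)) :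
    shock_dates.foldl
        (fun acc date => if date ∈ v.map (·.1) then acc else acc ++ [(date, cutoff)]) v =
      v ++ (shock_dates.filter
          (fun d => !(PySem.Set.contains (PySem.Set.ofList (v.map (·.1))) d))).map
        (fun d => (d, cutoff)) := by
  have hfun : (fun (acc : List (String × Int)) date =>
      if date ∈ v.map (·.1) then acc else acc ++ [(date, cutoff)]) =
      (fun acc date =>
        if (fun d => !(PySem.Set.contains (PySem.Set.ofList (v.map (·.1))) d)) date = true
        then acc ++ [(fun d => ((d : String), cutoff)) date] else acc) := by
    funext acc d
    by_cases h : d ∈ v.map (·.1) <;>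
      simp [h, PySem.Set.contains, PySem.Set.mem_ofList]
  rw [hfun, PySem.List.foldl_append_if]

-- Per-entry equality of the two pipelines.
lemma entry_eq (shock_dates : List String) (cutoff : Int) (kv : String × List (String × Int)) :
    (fun kv : String × List (String × Int) =>
      let values := kv.2
      let values :=
        if values.length < shock_dates.length then
          let dates := values.map (·.1)
          shock_dates.foldl (fun (acc : List (String × Int)) date => if date ∈ dates then acc else acc ++ [(date, cutoff)]) values
        else values
      let values := PySem.List.sorted2 values (·.1) (·.2) false
      let values := if shock_dates.length < values.length then remove_duplicates values else values
      (kv.1, values)) kv =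
    (fun kv : String × List (String × Int) =>
      let values := kv.2
      let values :=
        if values.length < shock_dates.length then
          let present := PySem.Set.ofList (values.map (·.1))
          values ++ (shock_dates.filter (fun d => !(PySem.Set.contains present d))).map (fun d => (d, cutoff))
        else values
      let values := PySem.List.sorted2 values (·.1) (·.2) false
      let values := if shock_dates.length < values.length then dedup_sorted values else values
      (kv.1, values)) kv := by
  simp only
  rw [fill_step_eq]
  split <;> split <;>
    first
      | rw [remove_duplicates_eq_dedup_sorted _ (sorted2_pairwise_lexLe _)]
      | rfl

-- ===== VERDICT (by name: the statement is the Claim_ definition above) =====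
theorem fill_missing_dates_spec : Claim_equal_fill_missing_dates := by
  intro rank_list shock_dates cutoff _ _
  unfold Spec_fill_missing_dates fill_missing_dates fill_missing_dates_alt
  exact List.map_congr_left (fun kv _ => entry_eq shock_dates cutoff kv)
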